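-- pv_equiv track=rewrite | github.com/Anna-Hax/cp-dsa | code/900-rating/Jellyfish_and_Undertale.py | can_sort
-- ===== SOURCE A (Python) =====
-- def can_sort(a, b, n, numlist):
--     numlist.sort()
--     sec = 0
--     while b>0:
--         i = numlist[0]
--         if b + i < a:
--             b += i
--             numlist.remove(i)
--
--         elif b == 1 and len(numlist) != 0 and b + numlist[0] >= a:
--             sec += a
--             return sec
--         else:
--             b -= 1
--             sec += 1
--
--     return sec
-- ===== SOURCE B (Python) =====
-- def can_sort(a, b, n, numlist):
--     # One early-exit pass over a sorted copy; each run of A's unit decrements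
--     # of b is collapsed into a single arithmetic batch.  Return value only:
--     # A sorts and removes from the caller's list in place, B leaves it unchanged.
--     sec = 0
--     for x in sorted(numlist):
--         if b <= 0:
--             return sec
--         if b + x < a:
--             b += x
--         elif x >= a - 1:
--             return sec + (b - 1) + a
--         else:
--             sec += b - (a - x - 1)
--             b = a - 1
--     return sec
-- ===== Notes on version B (the rewrite author's own statement) =====
-- stated objective: alternative
-- what changed: One early-exit pass over a sorted copy that collapses each run of A's unit decrements of b into a single arithmetic batch, instead of A's while loop that decrements b one second at a time and calls list.remove per absorbed element.
import Mathlib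
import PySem

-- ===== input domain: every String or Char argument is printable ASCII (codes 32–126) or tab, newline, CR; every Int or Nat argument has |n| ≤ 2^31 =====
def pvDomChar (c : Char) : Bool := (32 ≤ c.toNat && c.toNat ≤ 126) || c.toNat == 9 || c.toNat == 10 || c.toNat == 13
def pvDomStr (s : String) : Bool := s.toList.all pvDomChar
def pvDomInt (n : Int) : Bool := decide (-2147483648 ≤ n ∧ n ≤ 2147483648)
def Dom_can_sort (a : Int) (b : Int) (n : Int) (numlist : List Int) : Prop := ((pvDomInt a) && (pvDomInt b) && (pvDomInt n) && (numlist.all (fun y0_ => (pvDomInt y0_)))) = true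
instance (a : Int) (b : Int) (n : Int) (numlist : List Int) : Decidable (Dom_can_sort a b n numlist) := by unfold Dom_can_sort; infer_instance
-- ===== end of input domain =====

-- B replaces A's unit-decrement/remove while loop by a single early-exit pass over a
-- sorted copy with one arithmetic batch per element (objective: alternative). Return
-- value only: A sorts and removes from the caller's list in place, B leaves it unchanged.

-- ===== PORT A =====
-- the while loop of A; state (b, numlist, sec).
def can_sortLoop (a : Int) (b : Int) (lst : List Int) (sec : Int) : Int :=
  if 0 < b then
    match lst with
    | [] => sec  -- numlist[0] raises IndexError here; Pre_can_sort excludes these inputs, the value is irrelevant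
    | i :: rest =>
      if b + i < a then
        -- numlist.remove(i) with i = numlist[0]: the list is sorted, so the first
        -- occurrence of the minimal value i is the head; removal yields rest (exact).
        can_sortLoop a (b + i) rest sec
      else if b = 1 ∧ (i :: rest).length ≠ 0 ∧ a ≤ b + i then sec + a
      else can_sortLoop a (b - 1) (i :: rest) (sec + 1)
  else sec
termination_by (lst.length, b.toNat)
decreasing_by
  · exact Prod.Lex.left _ _ (by simp)
  · exact Prod.Lex.right _ (by omega)

def can_sort (a : Int) (b : Int) (n : Int) (numlist : List Int) : Int :=
  can_sortLoop a b (PySem.List.sorted numlist (fun x => x) false) 0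

-- ===== PORT B =====
-- B's for-loop body: an early-exit fold step; Sum.inl = the function has returned,
-- Sum.inr (b, sec) = the loop continues with this state.
def can_sortAltStep (a : Int) (st : Sum Int (Int × Int)) (x : Int) : Sum Int (Int × Int) :=
  match st with
  | .inl r => .inl r
  | .inr (b, sec) =>
    if b ≤ 0 then .inl sec
    else if b + x < a then .inr (b + x, sec)
    else if a - 1 ≤ x then .inl (sec + (b - 1) + a)
    else .inr (a - 1, sec + (b - (a - x - 1)))

def can_sort_alt (a : Int) (b : Int) (n : Int) (numlist : List Int) : Int :=
  match (PySem.List.sorted numlist (fun x => x) false).foldl (can_sortAltStep a) (.inr (b, 0)) with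
  | .inl r => r
  | .inr (_, sec) => sec

-- ===== PRECONDITION & SPEC =====
-- sum of the first m elements of the sorted list (helper for Pre_can_sort)
def pvPrefSum (numlist : List Int) (m : Nat) : Int :=
  ((PySem.List.sorted numlist (fun x => x) false).take m).sum

-- Pre_can_sort is EXACTLY the set of inputs on which A returns (elsewhere A raises
-- IndexError: the list is exhausted while b is still positive). It is stated in closed
-- form via an arithmetic invariant: along the run over the sorted list, the energy
-- before element k+2 equals min (b + S_{k+1}) (a - 1 + S_{k+1} - S_{j+1}) over earlier j
-- (S = prefix sums of the sorted list), and A returns iff b ≤ 0 initially, or some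
-- element is ≥ a - 1 (the explicit return branch fires), or that energy drops to ≤ 0.
def Pre_can_sort (a : Int) (b : Int) (n : Int) (numlist : List Int) : Prop :=
  b ≤ 0
  ∨ (∃ x ∈ numlist, a - 1 ≤ x)
  ∨ (∃ k ∈ List.range numlist.length,
       b + pvPrefSum numlist (k+1) ≤ 0
       ∨ ∃ j ∈ List.range (k+1), a - 1 + pvPrefSum numlist (k+1) - pvPrefSum numlist (j+1) ≤ 0)
instance (a : Int) (b : Int) (n : Int) (numlist : List Int) : Decidable (Pre_can_sort a b n numlist) := by unfold Pre_can_sort; infer_instance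

def pvWitness_can_sort : Int × Int × Int × List Int := (5, 3, 0, [2, 4])

def Spec_can_sort (a : Int) (b : Int) (n : Int) (numlist : List Int) (out : Int) : Prop := out = can_sort_alt a b n numlist
instance (a : Int) (b : Int) (n : Int) (numlist : List Int) (out : Int) : Decidable (Spec_can_sort a b n numlist out) := by unfold Spec_can_sort; infer_instance

-- ===== CLAIM =====
def Claim_equal_can_sort : Prop := ∀ (a : Int) (b : Int) (n : Int) (numlist : List Int), Dom_can_sort a b n numlist → Pre_can_sort a b n numlist → Spec_can_sort a b n numlist (can_sort a b n numlist)

-- ===== LEMMAS AND PROOFS =====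

-- the early-exit fold ignores the rest of the list once it has returned
theorem foldl_step_inl (a r : Int) (l : List Int) :
    l.foldl (can_sortAltStep a) (.inl r) = .inl r := by
  induction l with
  | nil => rfl
  | cons x rest ih => simpa [can_sortAltStep] using ih

-- A's decrement branch taken b-1 times ending in the b = 1 return (head x with a - x ≤ 1).
theorem can_sortLoop_drain (a x : Int) (rest : List Int) :
    ∀ (k : Nat) (sec : Int), a - x ≤ 1 →
      can_sortLoop a (1 + (k : Int)) (x :: rest) sec = sec + (k : Int) + a := by
  intro k
  induction k with
  | zero =>
    intro sec ht
    rw [can_sortLoop]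
    simp only [Nat.cast_zero, add_zero]
    have h1 : ¬ ((1 : Int) + x < a) := by omega
    rw [if_pos (show (0:Int) < 1 by omega), if_neg h1,
        if_pos (show True ∧ (x :: rest).length ≠ 0 ∧ a ≤ 1 + x from ⟨trivial, by simp, by omega⟩)]
  | succ k ih =>
    intro sec ht
    rw [can_sortLoop]
    have hb : (0 : Int) < 1 + ((k : Int) + 1) := by omega
    have h1 : ¬ (1 + ((k : Int) + 1) + x < a) := by omega
    have h2 : ¬ ((1 + ((k : Int) + 1) = 1) ∧ (x :: rest).length ≠ 0 ∧ a ≤ 1 + ((k : Int) + 1) + x) := by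
      intro h; omega
    push_cast
    push_cast at hb h1 h2
    simp only [if_pos hb, if_neg h1, if_neg h2]
    have : 1 + ((k : Int) + 1) - 1 = 1 + (k : Int) := by omega
    rw [this, ih (sec + 1) ht]
    omega

-- A's decrement branch taken down to b = a - x - 1, then the head is absorbed
-- (head x with 2 ≤ a - x): one arithmetic batch.
theorem can_sortLoop_batch (a x : Int) (rest : List Int) :
    ∀ (k : Nat) (sec : Int), 2 ≤ a - x →
      can_sortLoop a ((a - x - 1) + (k : Int)) (x :: rest) sec
        = can_sortLoop a (a - 1) rest (sec + (k : Int)) := by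
  intro k
  induction k with
  | zero =>
    intro sec ht
    rw [can_sortLoop]
    simp only [Nat.cast_zero, add_zero]
    have hb : (0 : Int) < (a - x - 1) := by omega
    have h1 : (a - x - 1) + x < a := by omega
    rw [if_pos hb, if_pos h1]
    have e : (a - x - 1) + x = a - 1 := by omega
    rw [e]
  | succ k ih =>
    intro sec ht
    rw [can_sortLoop]
    have hb : (0 : Int) < (a - x - 1) + ((k : Int) + 1) := by omega
    have h1 : ¬ ((a - x - 1) + ((k : Int) + 1) + x < a) := by omega
    have h2 : ¬ (((a - x - 1) + ((k : Int) + 1) = 1) ∧ (x :: rest).length ≠ 0 ∧ a ≤ (a - x - 1) + ((k : Int) + 1) + x) := by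
      intro h; omega
    push_cast
    push_cast at hb h1 h2
    simp only [if_pos hb, if_neg h1, if_neg h2]
    have : (a - x - 1) + ((k : Int) + 1) - 1 = (a - x - 1) + (k : Int) := by omega
    rw [this, ih (sec + 1) ht]
    have : sec + 1 + (k : Int) = sec + ((k : Int) + 1) := by omega
    rw [this]

theorem loop_eq (a : Int) :
    ∀ (lst : List Int) (b sec : Int),
      can_sortLoop a b lst sec
        = (match lst.foldl (can_sortAltStep a) (.inr (b, sec)) with
           | .inl r => r
           | .inr (_, s) => s) := by
  intro lst
  induction lst with
  | nil =>
    intro b sec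
    rw [can_sortLoop]
    by_cases hb : (0 : Int) < b <;> simp [hb, List.foldl]
  | cons x rest ih =>
    intro b sec
    by_cases hb : (0 : Int) < b
    · by_cases habs : b + x < a
      · rw [can_sortLoop]
        simp only [if_pos hb, List.foldl_cons, can_sortAltStep,
          if_neg (show ¬ b ≤ 0 by omega), if_pos habs]
        exact ih (b + x) sec
      · by_cases ht : 2 ≤ a - x
        · -- batch phase: b ≥ a - x ≥ 2
          have hbk : b = (a - x - 1) + ((b - (a - x - 1)).toNat : Int) := by omega
          have hlhs : can_sortLoop a b (x :: rest) sec
              = can_sortLoop a (a - 1) rest (sec + (b - (a - x - 1))) := by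
            conv_lhs => rw [hbk]
            rw [can_sortLoop_batch a x rest _ sec ht,
                show (((b - (a - x - 1)).toNat : Int)) = b - (a - x - 1) by omega]
          rw [hlhs, ih]
          simp only [List.foldl_cons, can_sortAltStep,
            if_neg (show ¬ b ≤ 0 by omega), if_neg habs,
            if_neg (show ¬ a - 1 ≤ x by omega)]
        · -- drain phase: head ≥ a - 1
          have hbk : b = 1 + ((b - 1).toNat : Int) := by omega
          have hlhs : can_sortLoop a b (x :: rest) sec = sec + (b - 1) + a := by
            conv_lhs => rw [hbk]
            rw [can_sortLoop_drain a x rest _ sec (by omega)]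
            omega
          rw [hlhs]
          simp only [List.foldl_cons, can_sortAltStep,
            if_neg (show ¬ b ≤ 0 by omega), if_neg habs,
            if_pos (show a - 1 ≤ x by omega), foldl_step_inl]
    · rw [can_sortLoop]
      simp only [if_neg hb, List.foldl_cons, can_sortAltStep,
        if_pos (show b ≤ 0 by omega), foldl_step_inl]

-- ===== VERDICT =====
theorem can_sort_spec : Claim_equal_can_sort := by
  intro a b n numlist _ _
  unfold Spec_can_sort can_sort can_sort_alt
  exact loop_eq a _ b 0
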